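-- pv_equiv track=rewrite | github.com/zhiyuzhang001-a11y/InstPlot | InstPlot.py | latex_to_unicode
-- ===== SOURCE A (Python) =====
-- def latex_to_unicode(name):
--     replacements = {
--         r'\theta': '\u03B8',   # θ
--         r'\mu': '\u03BC',      # μ
--         r'\Omega': '\u03A9',   # Ω
--         r'\alpha': '\u03B1',   # α
--         r'\beta': '\u03B2',    # β
--         r'\gamma': '\u03B3',   # γ
--         r'\Delta': '\u0394',   # Δ
--         r'\sigma': '\u03C3',   # σ
--     }
--     for k, v in replacements.items():
--         name = name.replace(k, v)
--     return name
-- ===== SOURCE B (Python) =====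
-- def latex_to_unicode(name):
--     table = [
--         ('\\theta', '\u03B8'),
--         ('\\mu', '\u03BC'),
--         ('\\Omega', '\u03A9'),
--         ('\\alpha', '\u03B1'),
--         ('\\beta', '\u03B2'),
--         ('\\gamma', '\u03B3'),
--         ('\\Delta', '\u0394'),
--         ('\\sigma', '\u03C3'),
--     ]
--     out = []
--     i = 0
--     n = len(name)
--     while i < n:
--         for k, v in table:
--             if name.startswith(k, i):
--                 out.append(v)
--                 i += len(k)
--                 break
--         else:
--             out.append(name[i])
--             i += 1
--     return ''.join(out)
-- ===== Notes on version B (the rewrite author's own statement) =====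
-- stated objective: alternative
-- what changed: Replaces A's eight sequential full-string str.replace passes with a single left-to-right scan that at each position tries the eight tokens and emits either the matched token's Unicode char or the current character; correct because no token is a prefix of another and no replacement char occurs in any token.
import Mathlib
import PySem

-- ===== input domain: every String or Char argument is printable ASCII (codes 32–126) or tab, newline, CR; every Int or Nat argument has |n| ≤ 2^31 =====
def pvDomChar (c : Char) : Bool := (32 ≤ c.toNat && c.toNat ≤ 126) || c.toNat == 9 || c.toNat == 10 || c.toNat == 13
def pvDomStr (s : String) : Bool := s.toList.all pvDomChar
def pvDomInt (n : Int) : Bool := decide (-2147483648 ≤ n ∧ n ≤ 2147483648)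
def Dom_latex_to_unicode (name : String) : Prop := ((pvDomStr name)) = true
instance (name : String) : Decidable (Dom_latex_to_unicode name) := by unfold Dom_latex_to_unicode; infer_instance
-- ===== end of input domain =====

-- B replaces A's eight sequential full-string replace passes with one hand-written
-- left-to-right scan that tries the eight tokens at each position; objective: alternative.

-- ===== PORT A =====
-- the dict literal of A (dict -> association list in insertion order)
def pvReplacements : List (String × String) :=
  [("\\theta", "θ"), ("\\mu", "μ"), ("\\Omega", "Ω"), ("\\alpha", "α"),
   ("\\beta", "β"), ("\\gamma", "γ"), ("\\Delta", "Δ"), ("\\sigma", "σ")]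

-- A: for k, v in replacements.items(): name = name.replace(k, v)
def latex_to_unicode (name : String) : String :=
  pvReplacements.foldl (fun n p => PySem.Str.replace n p.1 p.2) name

-- ===== PORT B =====
-- B's own token table, over character lists (the scan works character by character)
def pvTable : List (List Char × List Char) :=
  [ (['\\', 't', 'h', 'e', 't', 'a'], ['θ'])
  , (['\\', 'm', 'u'], ['μ'])
  , (['\\', 'O', 'm', 'e', 'g', 'a'], ['Ω'])
  , (['\\', 'a', 'l', 'p', 'h', 'a'], ['α'])
  , (['\\', 'b', 'e', 't', 'a'], ['β'])
  , (['\\', 'g', 'a', 'm', 'm', 'a'], ['γ'])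
  , (['\\', 'D', 'e', 'l', 't', 'a'], ['Δ'])
  , (['\\', 's', 'i', 'g', 'm', 'a'], ['σ']) ]

-- Source B's inner for-loop: first table entry whose token starts here, else none
def pvTryKeys : List (List Char × List Char) → List Char → Option (List Char × List Char)
  | [], _ => none
  | p :: rest, s => if p.1.isPrefixOf s then some p else pvTryKeys rest s

-- Source B's while-loop: emit the matched replacement and skip the token, else copy the char
def pvScanT (tbl : List (List Char × List Char)) : List Char → List Char
  | [] => []
  | c :: t =>
    match pvTryKeys tbl (c :: t) with
    | some (k, v) => v ++ pvScanT tbl (t.drop (k.length - 1))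
    | none => c :: pvScanT tbl t
  termination_by s => s.length
  decreasing_by
  · simp only [List.length_drop, List.length_cons]; omega
  · simp

def latex_to_unicode_alt (name : String) : String :=
  String.ofList (pvScanT pvTable name.toList)

-- ===== PRECONDITION & SPEC =====
def Spec_latex_to_unicode (name : String) (out : String) : Prop := out = latex_to_unicode_alt name
instance (name : String) (out : String) : Decidable (Spec_latex_to_unicode name out) := by unfold Spec_latex_to_unicode; infer_instance

-- ===== CLAIM (what is proved, stated in full; the proofs are below) =====
def Claim_equal_latex_to_unicode : Prop := ∀ (name : String), Dom_latex_to_unicode name → Spec_latex_to_unicode name (latex_to_unicode name)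


-- ===== LEMMAS AND PROOFS =====

lemma pvDrop_cons {k : List Char} (hk : k ≠ []) (c : Char) (t : List Char) :
    List.drop k.length (c :: t) = t.drop (k.length - 1) := by
  cases k with
  | nil => exact absurd rfl hk
  | cons a k' => simp


-- str.replace for a nonempty pattern, in structural form (mirrors PySem.Chars.replace.go)
def pvRepl (k v : List Char) : List Char → List Char
  | [] => []
  | c :: t =>
    if k.isPrefixOf (c :: t) then v ++ pvRepl k v (t.drop (k.length - 1))
    else c :: pvRepl k v t
  termination_by s => s.length
  decreasing_by
  · simp only [List.length_drop, List.length_cons]; omega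
  · simp

-- the table shape all our entries have: keys are '\' followed by backslash-free tails,
-- values are nonempty and share no character with any key
def pvGood (tbl : List (List Char × List Char)) : Prop :=
  (∀ p ∈ tbl, p.1 ≠ [] ∧ p.1.head? = some '\\' ∧ '\\' ∉ p.1.tail) ∧
  (∀ p ∈ tbl, p.2 ≠ [] ∧ ∀ q ∈ tbl, ∀ c ∈ p.2, c ∉ q.1)

lemma pvGood_tail {p : List Char × List Char} {tbl : List (List Char × List Char)}
    (h : pvGood (p :: tbl)) : pvGood tbl := by
  refine ⟨fun q hq => h.1 q (List.mem_cons_of_mem _ hq), fun q hq => ?_⟩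
  obtain ⟨h1, h2⟩ := h.2 q (List.mem_cons_of_mem _ hq)
  exact ⟨h1, fun r hr => h2 r (List.mem_cons_of_mem _ hr)⟩

-- PySem.Chars.replace computes pvRepl for nonempty patterns
lemma pvGo_eq (old new : List Char) (hold : old ≠ []) :
    ∀ (fuel : Nat) (l acc : List Char), l.length ≤ fuel →
      PySem.Chars.replace.go old new fuel l acc = acc.reverse ++ pvRepl old new l := by
  intro fuel
  induction fuel with
  | zero =>
    intro l acc hl
    have hln : l = [] := List.eq_nil_of_length_eq_zero (Nat.le_zero.mp hl)
    subst hln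
    rw [PySem.Chars.replace.go]
    simp [pvRepl]
  | succ f ih =>
    intro l acc hl
    cases l with
    | nil => rw [PySem.Chars.replace.go] <;> simp [pvRepl]
    | cons c t =>
      have hk1 : 1 ≤ old.length := by cases old with | nil => exact absurd rfl hold | cons a k' => simp
      rw [PySem.Chars.replace.go]
      by_cases hp : old.isPrefixOf (c :: t)
      · rw [if_pos hp, ih _ _ (by simp at hl ⊢; omega)]
        rw [pvRepl, if_pos hp, pvDrop_cons hold]
        simp
      · rw [if_neg hp, ih _ _ (by simp at hl ⊢; omega)]
        rw [pvRepl, if_neg hp]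
        simp

lemma pvReplace_eq (old new s : List Char) (hold : old ≠ []) :
    PySem.Chars.replace s old new = pvRepl old new s := by
  rw [PySem.Chars.replace,
    if_neg (fun h => hold (List.isEmpty_iff.mp h)),
    pvGo_eq old new hold s.length s [] le_rfl]
  simp

lemma pvRepl_prefix {k : List Char} (v : List Char) {s : List Char}
    (hk : k ≠ []) (h : k <+: s) :
    pvRepl k v s = v ++ pvRepl k v (s.drop k.length) := by
  cases s with
  | nil => exact absurd (List.prefix_nil.mp h) hk
  | cons c t =>
    rw [pvRepl, if_pos (List.isPrefixOf_iff_prefix.mpr h), pvDrop_cons hk]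

lemma pvRepl_not_prefix {k : List Char} (v : List Char) {c : Char} {t : List Char}
    (h : ¬ k <+: (c :: t)) : pvRepl k v (c :: t) = c :: pvRepl k v t := by
  rw [pvRepl, if_neg (fun hb => h (List.isPrefixOf_iff_prefix.mp hb))]

-- replace does not touch a region where the pattern never matches
lemma pvRepl_skip {k : List Char} (v : List Char) :
    ∀ (m : Nat) (s : List Char), (∀ j < m, ¬ k <+: s.drop j) →
      pvRepl k v s = s.take m ++ pvRepl k v (s.drop m) := by
  intro m
  induction m with
  | zero => intro s _; simp
  | succ m ih =>
    intro s h
    cases s with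
    | nil => simp
    | cons c t =>
      have h0 : ¬ k <+: (c :: t) := by simpa using h 0 (Nat.succ_pos m)
      rw [pvRepl_not_prefix v h0, List.take_succ_cons, List.drop_succ_cons,
        ih t (fun j hj => by simpa using h (j + 1) (by omega))]
      simp

-- a pattern-free word p that prefixes the replaced string already prefixed the original
lemma pvRepl_reflect {k v : List Char} (hv : v ≠ []) :
    ∀ (u p : List Char), (∀ c ∈ v, c ∉ p) → p <+: pvRepl k v u → p <+: u := by
  suffices H : ∀ n u, u.length ≤ n → ∀ p, (∀ c ∈ v, c ∉ p) → p <+: pvRepl k v u → p <+: u by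
    intro u p hp hpre; exact H u.length u le_rfl p hp hpre
  intro n
  induction n with
  | zero =>
    intro u hu p hp hpre
    have : u = [] := List.eq_nil_of_length_eq_zero (Nat.le_zero.mp hu)
    subst this
    rw [pvRepl] at hpre
    rw [List.prefix_nil.mp hpre]
  | succ n ih =>
    intro u hu p hp hpre
    cases u with
    | nil =>
      rw [pvRepl] at hpre
      rw [List.prefix_nil.mp hpre]
    | cons c t =>
      by_cases hk1 : k.isPrefixOf (c :: t)
      · rw [pvRepl, if_pos hk1] at hpre
        cases p with
        | nil => exact List.nil_prefix
        | cons d p' =>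
          exfalso
          cases v with
          | nil => exact hv rfl
          | cons e v' =>
            have hde : d = e := (List.cons_prefix_cons.mp (by simpa using hpre)).1
            exact hp e List.mem_cons_self (hde ▸ List.mem_cons_self)
      · rw [pvRepl, if_neg hk1] at hpre
        cases p with
        | nil => exact List.nil_prefix
        | cons d p' =>
          obtain ⟨hd, hp'⟩ := List.cons_prefix_cons.mp hpre
          subst hd
          refine List.cons_prefix_cons.mpr ⟨rfl, ih t (by simp at hu; omega) p'
            (fun c hc hcp => hp c hc (List.mem_cons_of_mem _ hcp)) hp'⟩

lemma pvScanT_nil (s : List Char) : pvScanT [] s = s := by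
  induction s with
  | nil => rw [pvScanT]
  | cons c t ih =>
    rw [pvScanT]
    show (match pvTryKeys [] (c :: t) with
      | some (k, v) => v ++ pvScanT [] (t.drop (k.length - 1))
      | none => c :: pvScanT [] t) = c :: t
    rw [show pvTryKeys [] (c :: t) = none from rfl]
    rw [ih]

lemma pvTryKeys_eq_none {tbl : List (List Char × List Char)} {s : List Char}
    (h : ∀ p ∈ tbl, ¬ p.1 <+: s) : pvTryKeys tbl s = none := by
  induction tbl with
  | nil => rfl
  | cons p rest ih =>
    rw [pvTryKeys, if_neg (fun hb => h p List.mem_cons_self (List.isPrefixOf_iff_prefix.mp hb))]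
    exact ih (fun q hq => h q (List.mem_cons_of_mem _ hq))

lemma pvTryKeys_spec {tbl : List (List Char × List Char)} {s : List Char}
    {k v : List Char} (h : pvTryKeys tbl s = some (k, v)) : (k, v) ∈ tbl ∧ k <+: s := by
  induction tbl with
  | nil => exact absurd h (by simp [pvTryKeys])
  | cons p rest ih =>
    rw [pvTryKeys] at h
    by_cases hb : p.1.isPrefixOf s
    · rw [if_pos hb] at h
      cases h
      exact ⟨List.mem_cons_self, List.isPrefixOf_iff_prefix.mp hb⟩
    · rw [if_neg hb] at h
      obtain ⟨h1, h2⟩ := ih h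
      exact ⟨List.mem_cons_of_mem _ h1, h2⟩

lemma pvTryKeys_congr {tbl : List (List Char × List Char)} {s₁ s₂ : List Char}
    (h : ∀ p ∈ tbl, (p.1 <+: s₁ ↔ p.1 <+: s₂)) : pvTryKeys tbl s₁ = pvTryKeys tbl s₂ := by
  induction tbl with
  | nil => rfl
  | cons p rest ih =>
    rw [pvTryKeys, pvTryKeys]
    by_cases hb : p.1 <+: s₁
    · rw [if_pos (List.isPrefixOf_iff_prefix.mpr hb),
        if_pos (List.isPrefixOf_iff_prefix.mpr ((h p List.mem_cons_self).mp hb))]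
    · rw [if_neg (fun hx => hb (List.isPrefixOf_iff_prefix.mp hx)),
        if_neg (fun hx => hb ((h p List.mem_cons_self).mpr (List.isPrefixOf_iff_prefix.mp hx)))]
      exact ih (fun q hq => h q (List.mem_cons_of_mem _ hq))

lemma pvScanT_cons_none {tbl : List (List Char × List Char)} {c : Char} {t : List Char}
    (h : pvTryKeys tbl (c :: t) = none) : pvScanT tbl (c :: t) = c :: pvScanT tbl t := by
  rw [pvScanT]
  show (match pvTryKeys tbl (c :: t) with
    | some (k, v) => v ++ pvScanT tbl (t.drop (k.length - 1))
    | none => c :: pvScanT tbl t) = _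
  rw [h]

lemma pvScanT_cons_some {tbl : List (List Char × List Char)} {c : Char} {t k v : List Char}
    (h : pvTryKeys tbl (c :: t) = some (k, v)) :
    pvScanT tbl (c :: t) = v ++ pvScanT tbl (t.drop (k.length - 1)) := by
  rw [pvScanT]
  show (match pvTryKeys tbl (c :: t) with
    | some (k, v) => v ++ pvScanT tbl (t.drop (k.length - 1))
    | none => c :: pvScanT tbl t) = _
  rw [h]

-- the scan copies a block whose characters occur in no key
lemma pvScanT_prepend {tbl : List (List Char × List Char)}
    (hkeys : ∀ p ∈ tbl, p.1 ≠ []) {v : List Char} (hv : ∀ p ∈ tbl, ∀ c ∈ v, c ∉ p.1) :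
    ∀ (X : List Char), pvScanT tbl (v ++ X) = v ++ pvScanT tbl X := by
  induction v with
  | nil => intro X; simp
  | cons c v' ih =>
    intro X
    have hnone : pvTryKeys tbl (c :: (v' ++ X)) = none := by
      refine pvTryKeys_eq_none (fun p hp hpre => ?_)
      cases hq : p.1 with
      | nil => exact hkeys p hp hq
      | cons d r =>
        rw [hq] at hpre
        have hd : d = c := (List.cons_prefix_cons.mp hpre).1
        exact hv p hp c List.mem_cons_self (hq ▸ hd ▸ List.mem_cons_self)
    rw [List.cons_append, pvScanT_cons_none hnone,
      ih (fun p hp c hc => hv p hp c (List.mem_cons_of_mem _ hc)) X, List.cons_append]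

-- the pattern k (head '\') never matches strictly inside a backslash-free prefix word
lemma pvNoInnerMatch {k t w : List Char} (hkh : k.head? = some '\\')
    (hno : '\\' ∉ w) (hp : w <+: t) : ∀ j < w.length, ¬ k <+: t.drop j := by
  intro j hj hk2
  obtain ⟨rest, rfl⟩ := hp
  cases k with
  | nil => simp at hkh
  | cons a k' =>
    have ha : a = '\\' := by simpa using hkh
    subst ha
    cases hdj : (w ++ rest).drop j with
    | nil => rw [hdj] at hk2; exact absurd (List.prefix_nil.mp hk2) (by simp)
    | cons b r =>
      rw [hdj] at hk2
      have hb : '\\' = b := (List.cons_prefix_cons.mp hk2).1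
      have h1 : (w ++ rest)[j]? = some b := by
        rw [← List.head?_drop, hdj]; rfl
      have h2 : (w ++ rest)[j]? = some w[j] := by
        rw [List.getElem?_append_left hj]
        exact List.getElem?_eq_getElem hj
      apply hno
      have hwb : w[j] = b := by rw [h2] at h1; exact Option.some.inj h1
      rw [hb, ← hwb]
      exact List.getElem_mem hj

-- KEY STEP: performing one replace first and then scanning with the remaining table
-- equals scanning with the full table
lemma pvStep (k v : List Char) (tbl : List (List Char × List Char))
    (hG : pvGood ((k, v) :: tbl)) :
    ∀ s, pvScanT tbl (pvRepl k v s) = pvScanT ((k, v) :: tbl) s := by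
  have hkne : k ≠ [] := (hG.1 (k, v) List.mem_cons_self).1
  have hkh : k.head? = some '\\' := (hG.1 (k, v) List.mem_cons_self).2.1
  have hvne : v ≠ [] := (hG.2 (k, v) List.mem_cons_self).1
  have hvk : ∀ q ∈ (k, v) :: tbl, ∀ c ∈ v, c ∉ q.1 :=
    fun q hq => (hG.2 (k, v) List.mem_cons_self).2 q hq
  have hk1 : 1 ≤ k.length := by cases k with | nil => exact absurd rfl hkne | cons a k' => simp
  suffices H : ∀ n s, s.length ≤ n → pvScanT tbl (pvRepl k v s) = pvScanT ((k, v) :: tbl) s by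
    intro s; exact H s.length s le_rfl
  intro n
  induction n with
  | zero =>
    intro s hs
    have : s = [] := List.eq_nil_of_length_eq_zero (Nat.le_zero.mp hs)
    subst this
    rw [pvRepl, pvScanT, pvScanT]
  | succ n ih =>
    intro s hs
    cases s with
    | nil => rw [pvRepl, pvScanT, pvScanT]
    | cons c t =>
      by_cases hpre : k <+: (c :: t)
      · rw [pvRepl_prefix v hkne hpre,
          pvScanT_prepend (fun p hp => (hG.1 p (List.mem_cons_of_mem _ hp)).1)
            (fun p hp => hvk p (List.mem_cons_of_mem _ hp)) _,
          ih ((c :: t).drop k.length) (by simp at hs ⊢; omega)]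
        have htry : pvTryKeys ((k, v) :: tbl) (c :: t) = some (k, v) := by
          rw [pvTryKeys, if_pos (List.isPrefixOf_iff_prefix.mpr hpre)]
        rw [pvScanT_cons_some htry, pvDrop_cons hkne]
      · rw [pvRepl_not_prefix v hpre]
        have hiff : ∀ p ∈ tbl, (p.1 <+: (c :: pvRepl k v t) ↔ p.1 <+: (c :: t)) := by
          intro p hp
          have hpne : p.1 ≠ [] := (hG.1 p (List.mem_cons_of_mem _ hp)).1
          have hptail : '\\' ∉ p.1.tail := (hG.1 p (List.mem_cons_of_mem _ hp)).2.2
          constructor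
          · intro h
            cases hq : p.1 with
            | nil => exact List.nil_prefix
            | cons d w =>
              rw [hq] at h
              obtain ⟨hd, hw⟩ := List.cons_prefix_cons.mp h
              subst hd
              have hw' : w <+: t := pvRepl_reflect hvne t w
                (fun x hx hxw => hvk p (List.mem_cons_of_mem _ hp) x hx
                  (by rw [hq]; exact List.mem_cons_of_mem _ hxw)) hw
              exact List.cons_prefix_cons.mpr ⟨rfl, hw'⟩
          · intro h
            cases hq : p.1 with
            | nil => exact List.nil_prefix
            | cons d w =>
              rw [hq] at h
              obtain ⟨hd, hw⟩ := List.cons_prefix_cons.mp h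
              subst hd
              have hno : '\\' ∉ w := fun hc => hptail (by rw [hq]; simpa using hc)
              have hskip := pvRepl_skip v w.length t (pvNoInnerMatch hkh hno hw)
              have hwt : t.take w.length = w := (List.prefix_iff_eq_take.mp hw).symm
              refine List.cons_prefix_cons.mpr ⟨rfl, ?_⟩
              rw [hskip, hwt]
              exact List.prefix_append _ _
        have htry2 : pvTryKeys tbl (c :: pvRepl k v t) = pvTryKeys tbl (c :: t) :=
          pvTryKeys_congr hiff
        have htryT : pvTryKeys ((k, v) :: tbl) (c :: t) = pvTryKeys tbl (c :: t) := by
          rw [pvTryKeys, if_neg (fun hb => hpre (List.isPrefixOf_iff_prefix.mp hb))]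
        cases h0 : pvTryKeys tbl (c :: t) with
        | none =>
          rw [pvScanT_cons_none (htry2.trans h0), pvScanT_cons_none (htryT.trans h0),
            ih t (by simp at hs; omega)]
        | some p =>
          obtain ⟨k', v'⟩ := p
          obtain ⟨hmem, hk'pre⟩ := pvTryKeys_spec h0
          have hk'ne : k' ≠ [] := (hG.1 (k', v') (List.mem_cons_of_mem _ hmem)).1
          have hk'tail : '\\' ∉ k'.tail := (hG.1 (k', v') (List.mem_cons_of_mem _ hmem)).2.2
          cases hk'c : k' with
          | nil => exact absurd hk'c hk'ne
          | cons d w =>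
            rw [hk'c] at hk'pre
            obtain ⟨hd, hw⟩ := List.cons_prefix_cons.mp hk'pre
            subst hd
            have hno : '\\' ∉ w := fun hc => hk'tail (by rw [hk'c]; simpa using hc)
            have hskip := pvRepl_skip v w.length t (pvNoInnerMatch hkh hno hw)
            have hwt : t.take w.length = w := (List.prefix_iff_eq_take.mp hw).symm
            rw [pvScanT_cons_some (htry2.trans (hk'c ▸ h0)),
              pvScanT_cons_some (htryT.trans (hk'c ▸ h0))]
            simp only [List.length_cons, Nat.add_sub_cancel]
            have hdrop : (pvRepl k v t).drop w.length = pvRepl k v (t.drop w.length) := by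
              rw [hskip, List.drop_left' (by rw [hwt])]
            rw [hdrop, ih (t.drop w.length) (by simp at hs ⊢; omega)]

lemma pvFoldl_eq_scanT : ∀ (tbl : List (List Char × List Char)), pvGood tbl →
    ∀ s, tbl.foldl (fun s p => pvRepl p.1 p.2 s) s = pvScanT tbl s := by
  intro tbl
  induction tbl with
  | nil => intro _ s; rw [List.foldl_nil, pvScanT_nil]
  | cons p rest ih =>
    obtain ⟨k0, v0⟩ := p
    intro hG s
    rw [List.foldl_cons, ih (pvGood_tail hG) (pvRepl k0 v0 s)]
    exact pvStep k0 v0 rest hG s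

lemma pvFold_toList (l : List (String × String)) :
    ∀ s : String, (l.foldl (fun n p => PySem.Str.replace n p.1 p.2) s).toList
      = (l.map (fun p => (p.1.toList, p.2.toList))).foldl
          (fun u p => PySem.Chars.replace u p.1 p.2) s.toList := by
  induction l with
  | nil => intro s; rfl
  | cons p rest ih =>
    intro s
    rw [List.foldl_cons, List.map_cons, List.foldl_cons, ih, PySem.Str.toList_replace]

lemma pvFoldl_replace_eq : ∀ (tbl : List (List Char × List Char)), (∀ p ∈ tbl, p.1 ≠ []) →
    ∀ u, tbl.foldl (fun u p => PySem.Chars.replace u p.1 p.2) u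
      = tbl.foldl (fun u p => pvRepl p.1 p.2 u) u := by
  intro tbl
  induction tbl with
  | nil => intro _ u; rfl
  | cons p rest ih =>
    intro h u
    rw [List.foldl_cons, List.foldl_cons,
      pvReplace_eq p.1 p.2 u (h p List.mem_cons_self),
      ih (fun q hq => h q (List.mem_cons_of_mem _ hq))]

-- A's string table, viewed over character lists, is exactly B's table
lemma pvMap_pvReplacements :
    pvReplacements.map (fun p => (p.1.toList, p.2.toList)) = pvTable := by decide

lemma pvGood_pvTable : pvGood pvTable := by
  constructor
  · intro p hp
    simp only [pvTable, List.mem_cons, List.not_mem_nil, or_false] at hp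
    rcases hp with h|h|h|h|h|h|h|h <;> subst h <;> exact ⟨by decide, by decide, by decide⟩
  · intro p hp
    simp only [pvTable, List.mem_cons, List.not_mem_nil, or_false] at hp
    rcases hp with h|h|h|h|h|h|h|h <;> subst h <;> refine ⟨by decide, fun q hq => ?_⟩ <;>
      · simp only [pvTable, List.mem_cons, List.not_mem_nil, or_false] at hq
        rcases hq with h|h|h|h|h|h|h|h <;> subst h <;> simp

-- ===== VERDICT (by name: the statement is the Claim_ definition above) =====
theorem latex_to_unicode_spec : Claim_equal_latex_to_unicode := by
  intro name _
  unfold Spec_latex_to_unicode latex_to_unicode latex_to_unicode_alt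
  apply String.toList_inj.mp
  rw [String.toList_ofList, pvFold_toList, pvMap_pvReplacements]
  rw [pvFoldl_replace_eq pvTable (fun p hp => (pvGood_pvTable.1 p hp).1),
    pvFoldl_eq_scanT pvTable pvGood_pvTable]
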